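-- pv_equiv track=rewrite | github.com/226wyj/leetcode-1 | amazon/two_sum.py | solution
-- ===== SOURCE A (Python) =====
-- def solution(nums, target):
--     if len(nums) < 2: return 0
--     nums.sort()
--     left, right, count = 0, len(nums) - 1, 0
--     while left < right:
--         if nums[left] + nums[right] <= target:
--             count += (right - left)
--             left += 1
--         else:
--             right -= 1
--     return count
-- ===== SOURCE B (Python) =====
-- def solution(nums, target):
--     if len(nums) < 2:
--         return 0
--     nums.sort()
--     n = len(nums)
--     count = 0
--     for i in range(n - 1):
--         x = target - nums[i]
--         # hand-rolled bisect_right over the suffix nums[i+1:n]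
--         lo, hi = i + 1, n
--         while lo < hi:
--             mid = (lo + hi) // 2
--             if nums[mid] <= x:
--                 lo = mid + 1
--             else:
--                 hi = mid
--         count += lo - (i + 1)
--     return count
-- ===== Notes on version B (the rewrite author's own statement) =====
-- stated objective: alternative
-- what changed: Replaces the converging two-pointer scan with, for each index i, a binary search over the sorted suffix nums[i+1:] for the first element exceeding target - nums[i], summing the per-index counts.
import Mathlib
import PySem

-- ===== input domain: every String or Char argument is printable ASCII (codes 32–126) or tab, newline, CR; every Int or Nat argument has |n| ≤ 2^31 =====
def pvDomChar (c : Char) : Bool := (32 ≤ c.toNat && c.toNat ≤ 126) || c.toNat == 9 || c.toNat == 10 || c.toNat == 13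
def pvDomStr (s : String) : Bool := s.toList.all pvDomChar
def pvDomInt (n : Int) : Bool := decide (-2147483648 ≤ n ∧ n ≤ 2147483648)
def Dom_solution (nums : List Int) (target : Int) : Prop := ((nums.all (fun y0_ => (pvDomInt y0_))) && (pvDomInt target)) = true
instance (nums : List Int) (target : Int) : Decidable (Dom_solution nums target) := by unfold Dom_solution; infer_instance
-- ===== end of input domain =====

-- B replaces A's converging two-pointer scan with one binary search per index over the
-- sorted suffix (alternative decomposition, same asymptotic cost). Both Pythons sort the
-- argument in place; the equivalence proved here is about the return value.


-- ===== PORT A =====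
-- the while-loop; left/right always stay in range while left < right, so getD is exact
def loopA (s : List Int) (t : Int) (left right : Nat) (count : Int) : Int :=
  if left < right then
    if s.getD left 0 + s.getD right 0 ≤ t then
      loopA s t (left + 1) right (count + ((right : Int) - (left : Int)))
    else
      loopA s t left (right - 1) count
  else count
termination_by right - left
decreasing_by all_goals omega

def solution (nums : List Int) (target : Int) : Int :=
  if nums.length < 2 then 0
  else loopA (PySem.List.sorted nums (fun x => x) false) target 0 (nums.length - 1) 0

-- ===== PORT B =====
-- the inner while-loop of Source B (hand-rolled bisect_right on the window [lo, hi))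
def bsearchB (s : List Int) (x : Int) (lo hi : Nat) : Nat :=
  if lo < hi then
    let mid := (lo + hi) / 2
    if s.getD mid 0 ≤ x then bsearchB s x (mid + 1) hi
    else bsearchB s x lo mid
  else lo
termination_by hi - lo
decreasing_by all_goals omega

def solution_alt (nums : List Int) (target : Int) : Int :=
  if nums.length < 2 then 0
  else
    (List.range (nums.length - 1)).foldl
      (fun count i => count +
        ((bsearchB (PySem.List.sorted nums (fun x => x) false)
            (target - (PySem.List.sorted nums (fun x => x) false).getD i 0)
            (i + 1) nums.length : Int) - ((i : Int) + 1)))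
      0

-- ===== PRECONDITION & SPEC =====
def Spec_solution (nums : List Int) (target : Int) (out : Int) : Prop := out = solution_alt nums target
instance (nums : List Int) (target : Int) (out : Int) : Decidable (Spec_solution nums target out) := by unfold Spec_solution; infer_instance

-- ===== CLAIM (what is proved, stated in full; the proofs are below) =====
def Claim_equal_solution : Prop := ∀ (nums : List Int) (target : Int), Dom_solution nums target → Spec_solution nums target (solution nums target)

-- ===== LEMMAS AND PROOFS =====

-- number of j in [lo, hi) with s[j] ≤ x
def cntLe (s : List Int) (x : Int) (lo hi : Nat) : Nat :=
  ∑ j ∈ Finset.Ico lo hi, if s.getD j 0 ≤ x then 1 else 0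

-- number of pairs l ≤ i < j ≤ r with s[i] + s[j] ≤ t
def pairCnt (s : List Int) (t : Int) (l r : Nat) : Nat :=
  ∑ i ∈ Finset.Ico l r, cntLe s (t - s.getD i 0) (i + 1) (r + 1)

-- monotone access for a sorted list
def Mono (s : List Int) : Prop :=
  ∀ p q : Nat, p ≤ q → q < s.length → s.getD p 0 ≤ s.getD q 0

lemma mono_sorted (nums : List Int) : Mono (PySem.List.sorted nums (fun x => x) false) := by
  intro p q hpq hq
  have hp : p < (PySem.List.sorted nums (fun x => x) false).length := lt_of_le_of_lt hpq hq
  rw [List.getD_eq_getElem _ _ hp, List.getD_eq_getElem _ _ hq]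
  exact PySem.List.sorted_id_getElem_mono nums hpq hq

lemma cntLe_empty (s : List Int) (x : Int) {lo hi : Nat} (h : hi ≤ lo) :
    cntLe s x lo hi = 0 := by
  unfold cntLe
  rw [Finset.Ico_eq_empty (by omega)]
  simp

lemma cntLe_split (s : List Int) (x : Int) {lo m hi : Nat} (h1 : lo ≤ m) (h2 : m ≤ hi) :
    cntLe s x lo hi = cntLe s x lo m + cntLe s x m hi := by
  unfold cntLe
  rw [← Finset.sum_Ico_consecutive _ h1 h2]

lemma cntLe_all_le (s : List Int) (x : Int) {lo hi : Nat}
    (h : ∀ j, lo ≤ j → j < hi → s.getD j 0 ≤ x) :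
    cntLe s x lo hi = hi - lo := by
  unfold cntLe
  have h1 : ∀ j ∈ Finset.Ico lo hi, (if s.getD j 0 ≤ x then (1 : Nat) else 0) = 1 := by
    intro j hj
    rw [Finset.mem_Ico] at hj
    exact if_pos (h j hj.1 hj.2)
  rw [Finset.sum_congr rfl h1, Finset.sum_const, smul_eq_mul, mul_one, Nat.card_Ico]

lemma cntLe_all_gt (s : List Int) (x : Int) {lo hi : Nat}
    (h : ∀ j, lo ≤ j → j < hi → x < s.getD j 0) :
    cntLe s x lo hi = 0 := by
  unfold cntLe
  apply Finset.sum_eq_zero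
  intro j hj
  rw [Finset.mem_Ico] at hj
  exact if_neg (not_le_of_gt (h j hj.1 hj.2))

-- bsearchB computes lo + (count of elements ≤ x in the window), on a monotone list
lemma bsearchB_eq (s : List Int) (x : Int) (hs : Mono s) :
    ∀ lo hi : Nat, hi ≤ s.length → bsearchB s x lo hi = lo + cntLe s x lo hi := by
  intro lo hi
  induction hfuel : hi - lo using Nat.strong_induction_on generalizing lo hi with
  | _ f ih =>
    intro hhi
    unfold bsearchB
    by_cases hlt : lo < hi
    · rw [if_pos hlt]
      set mid := (lo + hi) / 2 with hmid
      have hm1 : lo ≤ mid := by omega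
      have hm2 : mid < hi := by omega
      by_cases hc : s.getD mid 0 ≤ x
      · rw [if_pos hc]
        rw [ih (hi - (mid + 1)) (by omega) (mid + 1) hi rfl hhi]
        have hsplit := cntLe_split s x (show lo ≤ mid + 1 by omega) (show mid + 1 ≤ hi by omega)
        have hfull : cntLe s x lo (mid + 1) = (mid + 1) - lo := by
          apply cntLe_all_le
          intro j hj1 hj2
          exact le_trans (hs j mid (by omega) (by omega)) hc
        omega
      · rw [if_neg hc]
        rw [ih (mid - lo) (by omega) lo mid rfl (by omega)]
        have hsplit := cntLe_split s x hm1 (le_of_lt hm2)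
        have hnone : cntLe s x mid hi = 0 := by
          apply cntLe_all_gt
          intro j hj1 hj2
          exact lt_of_not_ge (fun hle => hc (le_trans (hs mid j hj1 (by omega)) hle))
        omega
    · rw [if_neg hlt, cntLe_empty s x (by omega)]
      omega

lemma pairCnt_empty (s : List Int) (t : Int) {l r : Nat} (h : r ≤ l) :
    pairCnt s t l r = 0 := by
  unfold pairCnt
  rw [Finset.Ico_eq_empty (by omega)]
  simp

-- window step when s[l] + s[r] ≤ t : row l is full
lemma pairCnt_step_left (s : List Int) (t : Int) (hs : Mono s) {l r : Nat}
    (hlr : l < r) (hr : r < s.length) (hle : s.getD l 0 + s.getD r 0 ≤ t) :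
    pairCnt s t l r = (r - l) + pairCnt s t (l + 1) r := by
  unfold pairCnt
  rw [Finset.sum_eq_sum_Ico_succ_bot hlr,
      cntLe_all_le s _ (fun j h1 h2 => by
        have := hs j r (by omega) hr
        omega)]
  omega

-- window step when t < s[l] + s[r] : column r is empty
lemma pairCnt_step_right (s : List Int) (t : Int) (hs : Mono s) {l r : Nat}
    (hlr : l < r) (hr : r < s.length) (hgt : ¬ s.getD l 0 + s.getD r 0 ≤ t) :
    pairCnt s t l r = pairCnt s t l (r - 1) := by
  obtain ⟨r', rfl⟩ : ∃ r', r = r' + 1 := ⟨r - 1, by omega⟩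
  rw [Nat.add_sub_cancel]
  unfold pairCnt
  rw [Finset.sum_Ico_succ_top (by omega : l ≤ r')]
  have hlast : cntLe s (t - s.getD r' 0) (r' + 1) (r' + 1 + 1) = 0 :=
    cntLe_all_gt s _ (fun j h1 h2 => by
      have hjr : j = r' + 1 := by omega
      subst hjr
      have h1' : s.getD l 0 ≤ s.getD r' 0 := hs l r' (by omega) (by omega)
      omega)
  rw [hlast, add_zero]
  apply Finset.sum_congr rfl
  intro i hi
  rw [Finset.mem_Ico] at hi
  rw [cntLe_split s (t - s.getD i 0) (by omega : i + 1 ≤ r' + 1) (by omega : r' + 1 ≤ r' + 1 + 1)]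
  have hcol : cntLe s (t - s.getD i 0) (r' + 1) (r' + 1 + 1) = 0 :=
    cntLe_all_gt s _ (fun j h1 h2 => by
      have hjr : j = r' + 1 := by omega
      subst hjr
      have h1' : s.getD l 0 ≤ s.getD i 0 := hs l i (by omega) (by omega)
      omega)
  rw [hcol, add_zero]

-- the two-pointer loop counts the pairs in the window [left, right]
lemma loopA_eq (s : List Int) (t : Int) (hs : Mono s) :
    ∀ left right : Nat, right < s.length → ∀ count : Int,
      loopA s t left right count = count + (pairCnt s t left right : Int) := by
  intro left right
  induction hfuel : right - left using Nat.strong_induction_on generalizing left right with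
  | _ f ih =>
    intro hr count
    unfold loopA
    by_cases hlt : left < right
    · rw [if_pos hlt]
      by_cases hc : s.getD left 0 + s.getD right 0 ≤ t
      · rw [if_pos hc, ih (right - (left + 1)) (by omega) (left + 1) right rfl hr,
            pairCnt_step_left s t hs hlt hr hc]
        push_cast
        omega
      · rw [if_neg hc, ih (right - 1 - left) (by omega) left (right - 1) rfl (by omega),
            pairCnt_step_right s t hs hlt hr hc]
    · rw [if_neg hlt, pairCnt_empty s t (by omega)]
      simp

-- the fold of B is the sum of the per-row counts
lemma foldB_eq (s : List Int) (t : Int) (hs : Mono s) (m : Nat) (hm : m ≤ s.length) :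
    ∀ init : Int,
      (List.range m).foldl
        (fun count i => count +
          ((bsearchB s (t - s.getD i 0) (i + 1) s.length : Int) - ((i : Int) + 1)))
        init
      = init + ((∑ i ∈ Finset.range m, cntLe s (t - s.getD i 0) (i + 1) s.length : Nat) : Int) := by
  induction m with
  | zero => intro init; simp
  | succ k ih =>
    intro init
    rw [List.range_succ, List.foldl_append, ih (by omega), List.foldl_cons, List.foldl_nil,
        bsearchB_eq s _ hs (k + 1) s.length (le_refl _), Finset.sum_range_succ]
    push_cast
    ring

theorem solution_spec : Claim_equal_solution := by
  intro nums target _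
  unfold Spec_solution solution solution_alt
  by_cases hlen : nums.length < 2
  · rw [if_pos hlen, if_pos hlen]
  · rw [if_neg hlen, if_neg hlen]
    have hs : Mono (PySem.List.sorted nums (fun x => x) false) := mono_sorted nums
    have hslen : (PySem.List.sorted nums (fun x => x) false).length = nums.length :=
      PySem.List.length_sorted nums _ _
    generalize hgen : PySem.List.sorted nums (fun x => x) false = s at hs hslen ⊢
    rw [← hslen]
    rw [loopA_eq s target hs 0 (s.length - 1) (by omega) 0,
        foldB_eq s target hs (s.length - 1) (by omega) 0]
    rw [zero_add, zero_add]
    congr 1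
    unfold pairCnt
    rw [show Finset.Ico 0 (s.length - 1) = Finset.range (s.length - 1) by
          rw [Finset.range_eq_Ico]]
    apply Finset.sum_congr rfl
    intro i _
    rw [show s.length - 1 + 1 = s.length by omega]
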